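-- pv_equiv track=rewrite | github.com/22Pickles/MidnightStrategyAnalysis | main.py | str4
-- ===== SOURCE A (Python) =====
-- def str4(roll, pocket):
--     s = []
--     if 1 not in pocket:
--         for i in range(len(roll)):
--             if roll[i] == 1:
--                 s.append(roll[i])
--                 break
--     if 4 not in pocket:
--         for i in range(len(roll)):
--             if roll[i] == 4:
--                 s.append(roll[i])
--                 break
--     for i in range(len(roll)):
--         if roll[i] == 6:
--             if len(roll) - len(s) < 5 and ((1 not in pocket) or (4 not in pocket)):
--                 break
--             else:
--                 s.append(roll[i])
--     if len(s) == 0: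
--         s.append(max(roll))
--     return s
-- ===== SOURCE B (Python) =====
-- def str4(roll, pocket):
--     s = []
--     if 1 not in pocket and 1 in roll:
--         s.append(1)
--     if 4 not in pocket and 4 in roll:
--         s.append(4)
--     n = roll.count(6)
--     if 1 not in pocket or 4 not in pocket:
--         n = min(n, max(0, len(roll) - 4 - len(s)))
--     s.extend([6] * n)
--     if not s:
--         s.append(max(roll))
--     return s
-- ===== Notes on version B (the rewrite author's own statement) =====
-- stated objective: simpler
-- what changed: Replaced A's three stateful break-loops (first-1 scan, first-4 scan, and the conditional-break 6-collection loop) by direct membership tests and an arithmetic count of 6s clamped by min/max.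
import Mathlib
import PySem

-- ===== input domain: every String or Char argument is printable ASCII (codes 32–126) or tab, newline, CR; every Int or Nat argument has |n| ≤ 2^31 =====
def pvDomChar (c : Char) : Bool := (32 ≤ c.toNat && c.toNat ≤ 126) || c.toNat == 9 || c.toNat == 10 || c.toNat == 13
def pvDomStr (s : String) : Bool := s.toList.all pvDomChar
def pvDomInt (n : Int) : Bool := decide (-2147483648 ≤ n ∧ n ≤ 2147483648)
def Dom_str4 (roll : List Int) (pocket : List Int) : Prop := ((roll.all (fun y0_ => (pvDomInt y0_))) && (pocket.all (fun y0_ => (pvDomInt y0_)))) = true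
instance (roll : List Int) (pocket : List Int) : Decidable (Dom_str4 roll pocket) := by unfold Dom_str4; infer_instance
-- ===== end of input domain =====

-- B replaces A's three conditional-break loops by direct membership tests and an
-- arithmetic count of 6s with a clamp (objective: simpler).

-- ===== PORT A =====
-- A's 'for … if roll[i]==v: append; break' loop: returns [v] at the first match, else []
def str4FindLoop (v : Int) : List Int → List Int
  | [] => []
  | x :: xs => if x = v then [x] else str4FindLoop v xs

-- A's third loop: scans roll, appending 6s into s, breaking when len(roll)-len(s) < 5 ∧ pcond
def str4SixLoop (L : Int) (pcond : Bool) : List Int → List Int → List Int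
  | s, [] => s
  | s, x :: xs =>
    if x = 6 then
      if L - (s.length : Int) < 5 ∧ pcond then s
      else str4SixLoop L pcond (s ++ [x]) xs
    else str4SixLoop L pcond s xs

def str4 (roll : List Int) (pocket : List Int) : List Int :=
  let s := if ¬ (1 : Int) ∈ pocket then str4FindLoop 1 roll else []
  let s := s ++ (if ¬ (4 : Int) ∈ pocket then str4FindLoop 4 roll else [])
  let s := str4SixLoop (roll.length : Int) (decide (¬ (1:Int) ∈ pocket ∨ ¬ (4:Int) ∈ pocket)) s roll
  if s.length = 0 then
    s ++ (match PySem.List.max? roll (fun x => x) with | some m => [m] | none => [])  -- max([]) raises: excluded by Pre_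
  else s

-- ===== PORT B =====
def str4_alt (roll : List Int) (pocket : List Int) : List Int :=
  let s := (if ¬ (1:Int) ∈ pocket ∧ (1:Int) ∈ roll then [(1:Int)] else [])
        ++ (if ¬ (4:Int) ∈ pocket ∧ (4:Int) ∈ roll then [(4:Int)] else [])
  let n : Int := (roll.count 6 : Int)
  let n : Int := if ¬ (1:Int) ∈ pocket ∨ ¬ (4:Int) ∈ pocket
                 then min n (max 0 ((roll.length : Int) - 4 - (s.length : Int)))
                 else n
  let s := s ++ List.replicate n.toNat 6
  if s = [] then
    (match PySem.List.max? roll (fun x => x) with | some m => [m] | none => [])  -- max([]) raises: excluded by Pre_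
  else s

-- ===== PRECONDITION & SPEC =====
-- A (and B) raise ValueError via max([]) exactly when roll is empty (s is then necessarily empty).
def Pre_str4 (roll : List Int) (pocket : List Int) : Prop := roll ≠ []
instance (roll : List Int) (pocket : List Int) : Decidable (Pre_str4 roll pocket) := by unfold Pre_str4; infer_instance
def pvWitness_str4 : List Int × List Int := ([6, 1, 6, 2, 4, 6], [4])

def Spec_str4 (roll : List Int) (pocket : List Int) (out : List Int) : Prop := out = str4_alt roll pocket
instance (roll : List Int) (pocket : List Int) (out : List Int) : Decidable (Spec_str4 roll pocket out) := by unfold Spec_str4; infer_instance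

-- ===== CLAIM (what is proved, stated in full; the proofs are below) =====
def Claim_equal_str4 : Prop := ∀ (roll : List Int) (pocket : List Int), Dom_str4 roll pocket → Pre_str4 roll pocket → Spec_str4 roll pocket (str4 roll pocket)

-- ===== LEMMAS AND PROOFS =====

theorem str4FindLoop_eq (v : Int) (xs : List Int) :
    str4FindLoop v xs = if v ∈ xs then [v] else [] := by
  induction xs with
  | nil => simp [str4FindLoop]
  | cons x xs ih =>
    by_cases h : x = v
    · simp [str4FindLoop, h]
    · simp [str4FindLoop, h, ih, Ne.symm h]

theorem str4SixLoop_false (L : Int) (xs : List Int) (s : List Int) :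
    str4SixLoop L false s xs = s ++ List.replicate (xs.count 6) 6 := by
  induction xs generalizing s with
  | nil => simp [str4SixLoop]
  | cons x xs ih =>
    rw [str4SixLoop]
    by_cases h : x = 6
    · subst h
      rw [if_pos rfl, if_neg (by simp), ih, List.count_cons_self, List.replicate_succ]
      simp
    · rw [if_neg h, ih]
      have hc : List.count 6 (x :: xs) = List.count 6 xs := by simp [List.count_cons, h]
      rw [hc]

theorem str4SixLoop_true (L : Int) (xs : List Int) (s : List Int) :
    str4SixLoop L true s xs
      = s ++ List.replicate (min (xs.count 6) (max 0 (L - 4 - (s.length : Int))).toNat) 6 := by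
  induction xs generalizing s with
  | nil => simp [str4SixLoop]
  | cons x xs ih =>
    rw [str4SixLoop]
    by_cases h : x = 6
    · rw [if_pos h]; subst h
      by_cases hb : L - (s.length : Int) < 5
      · rw [if_pos ⟨hb, rfl⟩]
        have h0 : (max 0 (L - 4 - (s.length : Int))).toNat = 0 := by omega
        simp [h0]
      · rw [if_neg (by simp [hb]), ih]
        have hlen : (s ++ [(6:Int)]).length = s.length + 1 := by simp
        have hmin : min ((6 :: xs).count 6) (max 0 (L - 4 - (s.length : Int))).toNat
            = min (xs.count 6) (max 0 (L - 4 - (((s ++ [(6:Int)]).length : Nat) : Int))).toNat + 1 := by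
          rw [List.count_cons_self, hlen]
          push_cast
          omega
        rw [hmin, List.replicate_succ]
        simp
    · rw [if_neg h, ih]
      have hc : List.count 6 (x :: xs) = List.count 6 xs := by simp [List.count_cons, h]
      rw [hc]

theorem str4_eq (roll pocket : List Int) (hne : roll ≠ []) :
    str4 roll pocket = str4_alt roll pocket := by
  unfold str4 str4_alt
  have hs : (if ¬ (1:Int) ∈ pocket then str4FindLoop 1 roll else [])
          ++ (if ¬ (4:Int) ∈ pocket then str4FindLoop 4 roll else [])
      = (if ¬ (1:Int) ∈ pocket ∧ (1:Int) ∈ roll then [(1:Int)] else [])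
          ++ (if ¬ (4:Int) ∈ pocket ∧ (4:Int) ∈ roll then [(4:Int)] else []) := by
    rw [str4FindLoop_eq, str4FindLoop_eq]
    by_cases h1 : (1:Int) ∈ pocket <;> by_cases h4 : (4:Int) ∈ pocket <;>
      by_cases r1 : (1:Int) ∈ roll <;> by_cases r4 : (4:Int) ∈ roll <;>
      simp [h1, h4, r1, r4]
  simp only
  rw [hs]
  set s0 := (if ¬ (1:Int) ∈ pocket ∧ (1:Int) ∈ roll then [(1:Int)] else [])
          ++ (if ¬ (4:Int) ∈ pocket ∧ (4:Int) ∈ roll then [(4:Int)] else []) with hs0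
  by_cases hp : ¬ (1:Int) ∈ pocket ∨ ¬ (4:Int) ∈ pocket
  · have hd : decide (¬ (1:Int) ∈ pocket ∨ ¬ (4:Int) ∈ pocket) = true := by
      simpa using hp
    rw [hd, str4SixLoop_true, if_pos hp]
    have hmn : (min ((roll.count 6 : Int)) (max 0 ((roll.length : Int) - 4 - (s0.length : Int)))).toNat
        = min (roll.count 6) (max 0 ((roll.length : Int) - 4 - (s0.length : Int))).toNat := by
      omega
    rw [hmn]
    by_cases hz : s0 ++ List.replicate (min (roll.count 6) (max 0 ((roll.length:Int) - 4 - (s0.length:Int))).toNat) 6 = []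
    · rw [if_pos (by simpa [List.length_eq_zero_iff] using hz), if_pos hz, hz]
      simp
    · rw [if_neg (by simpa [List.length_eq_zero_iff] using hz), if_neg hz]
  · have hd : decide (¬ (1:Int) ∈ pocket ∨ ¬ (4:Int) ∈ pocket) = false := by
      simpa using hp
    rw [hd, str4SixLoop_false, if_neg hp]
    -- here 1 ∈ pocket and 4 ∈ pocket, so s0 = []
    rw [not_or, not_not, not_not] at hp
    have hs0e : s0 = [] := by simp [hs0, hp.1, hp.2]
    rw [hs0e]
    by_cases hz : List.replicate (roll.count 6) (6:Int) = []
    · have hc : roll.count 6 = 0 := by simpa using hz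
      simp [hc]
    · rw [if_neg (by simpa [List.length_eq_zero_iff] using hz :
            ¬ (([] : List Int) ++ List.replicate (roll.count 6) (6:Int)).length = 0),
          if_neg (by simpa using hz :
            ¬ (([] : List Int) ++ List.replicate ((roll.count 6 : Int)).toNat (6:Int)) = [])]
      simp

-- ===== VERDICT (by name: the statement is the Claim_ definition above) =====
theorem str4_spec : Claim_equal_str4 := by
  intro roll pocket _ hpre
  exact str4_eq roll pocket hpre
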